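-- pv_equiv track=rewrite | github.com/ZhuXiaobing/algorithm-notes | 算法基础/位运算/只出现一次的数字2.py | setAndReturnIndex
-- ===== SOURCE A (Python) =====
-- def setAndReturnIndex(l, bit, start, end):
--     if (start >= end):
--         if ((l[end] & bit) != 0):
--             return end
--         else:
--             return end - 1
--     while ((l[start] & bit) != 0):
--         start = start + 1
--     temp = l[start]
--     l[start] = l[end]
--     l[end] = temp;
--     end = end - 1
--     return setAndReturnIndex(l, bit, start, end)
-- ===== SOURCE B (Python) =====
-- def _first_unset(l, bit, i):
--     while (l[i] & bit) != 0:
--         i += 1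
--     return i
--
-- def setAndReturnIndex(l, bit, start, end):
--     while start < end:
--         start = _first_unset(l, bit, start)
--         l[start], l[end] = l[end], l[start]
--         end -= 1
--     return end if (l[end] & bit) != 0 else end - 1
-- ===== Notes on version B (the rewrite author's own statement) =====
-- stated objective: idiomatic
-- what changed: The tail recursion is replaced by an explicit while loop (no recursion depth / stack use), with the inner scan factored into a helper and the final index computed once after the loop.
import Mathlib
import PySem

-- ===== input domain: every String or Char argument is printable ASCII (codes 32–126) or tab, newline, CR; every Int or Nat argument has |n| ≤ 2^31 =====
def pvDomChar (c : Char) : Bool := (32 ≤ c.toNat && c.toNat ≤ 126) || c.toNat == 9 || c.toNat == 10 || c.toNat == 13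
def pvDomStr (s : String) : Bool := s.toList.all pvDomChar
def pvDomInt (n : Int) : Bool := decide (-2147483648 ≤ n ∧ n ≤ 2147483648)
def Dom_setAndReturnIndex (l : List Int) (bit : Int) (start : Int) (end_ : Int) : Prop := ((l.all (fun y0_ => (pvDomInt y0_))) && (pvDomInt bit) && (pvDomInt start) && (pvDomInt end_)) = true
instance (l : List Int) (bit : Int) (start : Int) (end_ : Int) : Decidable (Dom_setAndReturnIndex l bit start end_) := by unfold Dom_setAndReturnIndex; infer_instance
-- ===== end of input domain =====

-- B replaces A's tail recursion by an explicit while loop; both mutate l with the identical swap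
-- sequence, and the theorems below are about the return value.
-- (Fuel arguments are totality guards only: they are provably never exhausted on admitted inputs.)

-- ===== PORT A =====
-- A's inner 'while ((l[start] & bit) != 0): start = start + 1'; none = the scan runs off the list
-- (Python: IndexError); the fuel 2*len(l)+1 covers every possible walk of in-range indices
def pvScanAFuel (l : List Int) (bit : Int) : Nat → Int → Option Int
  | 0, _ => none
  | f + 1, i =>
    match PySem.List.pyGet? l i with
    | none => none
    | some v => if PySem.Int.band v bit ≠ 0 then pvScanAFuel l bit f (i + 1) else some i

def pvScanA (l : List Int) (bit : Int) (i : Int) : Option Int :=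
  pvScanAFuel l bit (2 * l.length + 1) i

-- A's recursion; each call decreases end - start by at least one, so the fuel suffices
def pvGoA (bit : Int) : Nat → List Int → Int → Int → Int
  | 0, _, _, _ => 0  -- fuel exhausted: unreachable from setAndReturnIndex
  | f + 1, l, s, e =>
    if s ≥ e then
      match PySem.List.pyGet? l e with
      | some v => if PySem.Int.band v bit ≠ 0 then e else e - 1
      | none => 0  -- Python raises IndexError here (excluded by Pre_)
    else
      match pvScanA l bit s with
      | none => 0  -- Python raises IndexError inside the scan (excluded by Pre_)
      | some i =>
        match PySem.List.pyGet? l i, PySem.List.pyGet? l e with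
        | some ti, some te =>
          pvGoA bit f (PySem.List.pySetD (PySem.List.pySetD l i te) e ti) i (e - 1)
        | _, _ => 0  -- Python raises IndexError at the swap (excluded by Pre_)

def setAndReturnIndex (l : List Int) (bit : Int) (start : Int) (end_ : Int) : Int :=
  pvGoA bit ((end_ - start).toNat + 1) l start end_

-- ===== PORT B =====
-- B's helper '_first_unset': first index ≥ i whose element lacks the bit; if the walk runs off the
-- list it returns the offending index itself (Python raises there; excluded by Pre_)
def pvFirstUnsetFuel (l : List Int) (bit : Int) : Nat → Int → Int
  | 0, i => i
  | f + 1, i =>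
    match PySem.List.pyGet? l i with
    | some v => if PySem.Int.band v bit ≠ 0 then pvFirstUnsetFuel l bit f (i + 1) else i
    | none => i

def pvFirstUnset (l : List Int) (bit : Int) (i : Int) : Int :=
  pvFirstUnsetFuel l bit (2 * l.length + 1) i

-- B's 'while start < end:' loop run to exhaustion, returning the final list and final end
def pvLoopB (bit : Int) : Nat → List Int → Int → Int → List Int × Int
  | 0, l, _, e => (l, e)  -- fuel exhausted: unreachable from setAndReturnIndex_alt
  | f + 1, l, s, e =>
    if s < e then
      match PySem.List.pyGet? l (pvFirstUnset l bit s), PySem.List.pyGet? l e with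
      | some vs, some ve =>
        pvLoopB bit f (PySem.List.pySetD (PySem.List.pySetD l (pvFirstUnset l bit s) ve) e vs)
          (pvFirstUnset l bit s) (e - 1)
      | _, _ => (l, e)  -- Python raises IndexError at the swap (excluded by Pre_)
    else (l, e)

-- B's return statement after the loop
def pvFinishB (bit : Int) (st : List Int × Int) : Int :=
  match PySem.List.pyGet? st.1 st.2 with
  | some v => if PySem.Int.band v bit ≠ 0 then st.2 else st.2 - 1
  | none => 0  -- Python raises IndexError (excluded by Pre_)

def setAndReturnIndex_alt (l : List Int) (bit : Int) (start : Int) (end_ : Int) : Int :=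
  pvFinishB bit (pvLoopB bit ((end_ - start).toNat + 1) l start end_)

-- ===== PRECONDITION & SPEC =====
-- Pre_ holds exactly when the Python A returns normally (no IndexError): the final l[end] access is
-- in range, and in the recursive case the unguarded inner scan meets an element without the bit
-- before running off the right end of the list.
def Pre_setAndReturnIndex (l : List Int) (bit : Int) (start : Int) (end_ : Int) : Prop :=
  if start ≥ end_ then PySem.Raise.InRange l.length end_
  else -(l.length : Int) ≤ start ∧ end_ < (l.length : Int) ∧
    ∃ j ∈ PySem.List.pyRange start (l.length : Int) 1,
      ((PySem.List.pyGet? l j).any (fun v => PySem.Int.band v bit == 0)) = true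
instance (l : List Int) (bit : Int) (start : Int) (end_ : Int) : Decidable (Pre_setAndReturnIndex l bit start end_) := by unfold Pre_setAndReturnIndex; infer_instance

def pvWitness_setAndReturnIndex : List Int × Int × Int × Int := ([1, 2, 3], 2, 0, 2)

def Spec_setAndReturnIndex (l : List Int) (bit : Int) (start : Int) (end_ : Int) (out : Int) : Prop := out = setAndReturnIndex_alt l bit start end_
instance (l : List Int) (bit : Int) (start : Int) (end_ : Int) (out : Int) : Decidable (Spec_setAndReturnIndex l bit start end_ out) := by unfold Spec_setAndReturnIndex; infer_instance

-- ===== CLAIM (what is proved, stated in full; the proofs are below) =====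
def Claim_equal_setAndReturnIndex : Prop := ∀ (l : List Int) (bit : Int) (start : Int) (end_ : Int), Dom_setAndReturnIndex l bit start end_ → Pre_setAndReturnIndex l bit start end_ → Spec_setAndReturnIndex l bit start end_ (setAndReturnIndex l bit start end_)

-- ===== LEMMAS AND PROOFS =====

theorem pv_InRange_of_some {l : List Int} {i : Int} {v : Int}
    (h : PySem.List.pyGet? l i = some v) : PySem.Raise.InRange l.length i := by
  by_contra hc
  rw [(PySem.List.pyGet?_eq_none_iff l i).mpr hc] at h
  simp at h

-- A's scan only moves the index forward
theorem pvScanAFuel_le (l : List Int) (bit : Int) :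
    ∀ (f : Nat) (i j : Int), pvScanAFuel l bit f i = some j → i ≤ j := by
  intro f
  induction f with
  | zero => intro i j h; simp [pvScanAFuel] at h
  | succ f ih =>
    intro i j h
    simp only [pvScanAFuel] at h
    cases hg : PySem.List.pyGet? l i with
    | none => simp [hg] at h
    | some v =>
      simp only [hg] at h
      by_cases hb : PySem.Int.band v bit ≠ 0
      · rw [if_pos hb] at h; have := ih (i + 1) j h; omega
      · rw [if_neg hb, Option.some.injEq] at h; omega

-- A's scan stops at an in-range element without the bit
theorem pvScanAFuel_props (l : List Int) (bit : Int) :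
    ∀ (f : Nat) (i j : Int), pvScanAFuel l bit f i = some j →
      ∃ v, PySem.List.pyGet? l j = some v ∧ PySem.Int.band v bit = 0 := by
  intro f
  induction f with
  | zero => intro i j h; simp [pvScanAFuel] at h
  | succ f ih =>
    intro i j h
    simp only [pvScanAFuel] at h
    cases hg : PySem.List.pyGet? l i with
    | none => simp [hg] at h
    | some v =>
      simp only [hg] at h
      by_cases hb : PySem.Int.band v bit ≠ 0
      · rw [if_pos hb] at h; exact ih (i + 1) j h
      · rw [if_neg hb, Option.some.injEq] at h
        exact ⟨v, h ▸ hg, by simpa using hb⟩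

-- the two inner scans agree (at equal fuel) where A's succeeds
theorem pvFirstUnsetFuel_eq (l : List Int) (bit : Int) :
    ∀ (f : Nat) (i j : Int), pvScanAFuel l bit f i = some j → pvFirstUnsetFuel l bit f i = j := by
  intro f
  induction f with
  | zero => intro i j h; simp [pvScanAFuel] at h
  | succ f ih =>
    intro i j h
    simp only [pvScanAFuel] at h
    simp only [pvFirstUnsetFuel]
    cases hg : PySem.List.pyGet? l i with
    | none => simp [hg] at h
    | some v =>
      simp only [hg] at h
      show (if PySem.Int.band v bit ≠ 0 then pvFirstUnsetFuel l bit f (i + 1) else i) = j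
      by_cases hb : PySem.Int.band v bit ≠ 0
      · rw [if_pos hb] at h; rw [if_pos hb]; exact ih (i + 1) j h
      · rw [if_neg hb, Option.some.injEq] at h; rw [if_neg hb]; exact h

-- A's scan succeeds when some element from index s on lacks the bit (and the fuel covers the walk)
theorem pvScanAFuel_isSome (l : List Int) (bit : Int) :
    ∀ (f : Nat) (s : Int), -(l.length : Int) ≤ s →
      (∃ j, s ≤ j ∧ j < (l.length : Int) ∧
        ((PySem.List.pyGet? l j).any (fun v => PySem.Int.band v bit == 0)) = true) →
      ((l.length : Int) - s).toNat < f →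
      ∃ i, pvScanAFuel l bit f s = some i := by
  intro f
  induction f with
  | zero => intro s _ hex hf; omega
  | succ f ih =>
    intro s hs hex hf
    obtain ⟨j, hsj, hjn, hany⟩ := hex
    simp only [pvScanAFuel]
    cases hg : PySem.List.pyGet? l s with
    | none =>
      have hnr := (PySem.List.pyGet?_eq_none_iff l s).mp hg
      unfold PySem.Raise.InRange at hnr
      omega
    | some v =>
      show ∃ i, (if PySem.Int.band v bit ≠ 0 then pvScanAFuel l bit f (s + 1) else some s) = some i
      by_cases hb : PySem.Int.band v bit ≠ 0
      · rw [if_pos hb]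
        have hjs : j ≠ s := by
          intro hq; subst hq
          rw [hg] at hany; simp at hany
          exact hb (by simpa using hany)
        exact ih (s + 1) (by omega) ⟨j, by omega, hjn, hany⟩ (by omega)
      · rw [if_neg hb]
        exact ⟨s, rfl⟩

theorem pv_pyIdx_facts (n : Nat) (e : Int) (h : PySem.Raise.InRange n e) :
    ∃ k : Nat, PySem.List.pyIdx? n e = some k ∧ k < n ∧ ((k : Int) = e ∨ (k : Int) = e + n) := by
  unfold PySem.Raise.InRange at h
  unfold PySem.List.pyIdx?
  split_ifs with h1 h2 h3
  · exact ⟨e.toNat, rfl, by omega, Or.inl (by omega)⟩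
  · omega
  · exact ⟨n - (-e).toNat, rfl, by omega, Or.inr (by omega)⟩
  · omega

theorem pv_pySetD_eq_set (xs : List Int) (e v : Int) (k : Nat)
    (h : PySem.List.pyIdx? xs.length e = some k) :
    PySem.List.pySetD xs e v = xs.set k v := by
  unfold PySem.List.pySetD PySem.List.pySet?
  rw [h]; rfl

-- the core equivalence: A's recursion computes B's loop followed by B's final expression
theorem pv_main (bit : Int) : ∀ (m fa fb : Nat) (l : List Int) (s e : Int),
    (e - s).toNat ≤ m → m < fa → m < fb → Pre_setAndReturnIndex l bit s e →
    pvGoA bit fa l s e = pvFinishB bit (pvLoopB bit fb l s e) := by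
  intro m
  induction m with
  | zero =>
    intro fa fb l s e hm hfa hfb _
    obtain ⟨fa', rfl⟩ : ∃ fa', fa = fa' + 1 := ⟨fa - 1, by omega⟩
    obtain ⟨fb', rfl⟩ : ∃ fb', fb = fb' + 1 := ⟨fb - 1, by omega⟩
    have hse : s ≥ e := by omega
    simp only [pvGoA, pvLoopB, if_pos hse, if_neg (by omega : ¬ s < e)]
    rfl
  | succ m ih =>
    intro fa fb l s e hm hfa hfb hpre
    obtain ⟨fa', rfl⟩ : ∃ fa', fa = fa' + 1 := ⟨fa - 1, by omega⟩
    obtain ⟨fb', rfl⟩ : ∃ fb', fb = fb' + 1 := ⟨fb - 1, by omega⟩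
    by_cases hse : s ≥ e
    · simp only [pvGoA, pvLoopB, if_pos hse, if_neg (by omega : ¬ s < e)]
      rfl
    · have hslt : s < e := by omega
      unfold Pre_setAndReturnIndex at hpre
      rw [if_neg hse] at hpre
      obtain ⟨hs, he, j, hjmem, hjany⟩ := hpre
      rw [PySem.List.mem_pyRange_one] at hjmem
      obtain ⟨i, hscan⟩ := pvScanAFuel_isSome l bit (2 * l.length + 1) s hs
        ⟨j, hjmem.1, hjmem.2, hjany⟩ (by omega)
      obtain ⟨vi, hgi, hclear⟩ := pvScanAFuel_props l bit (2 * l.length + 1) s i hscan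
      have hsi := pvScanAFuel_le l bit (2 * l.length + 1) s i hscan
      have hiR := pv_InRange_of_some hgi
      unfold PySem.Raise.InRange at hiR
      have heR : PySem.Raise.InRange l.length e := by
        unfold PySem.Raise.InRange; omega
      obtain ⟨ve, hge⟩ : ∃ v, PySem.List.pyGet? l e = some v := by
        cases hq : PySem.List.pyGet? l e with
        | none => exact absurd ((PySem.List.pyGet?_eq_none_iff l e).mp hq) (not_not_intro heR)
        | some v => exact ⟨v, rfl⟩
      have hfu : pvFirstUnset l bit s = i :=
        pvFirstUnsetFuel_eq l bit (2 * l.length + 1) s i hscan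
      simp only [pvGoA, pvLoopB, if_neg hse, if_pos hslt, hfu]
      rw [show pvScanA l bit s = some i from hscan]
      simp only [hgi, hge]
      apply ih
      · omega
      · omega
      · omega
      · -- Pre_ holds for the next state
        have hlen : (PySem.List.pySetD (PySem.List.pySetD l i ve) e vi).length = l.length := by
          simp [PySem.List.length_pySetD]
        unfold Pre_setAndReturnIndex
        by_cases hie : i ≥ e - 1
        · rw [if_pos hie]
          unfold PySem.Raise.InRange
          rw [hlen]; constructor <;> omega
        · rw [if_neg hie]
          obtain ⟨k, hk, hkn, hke⟩ := pv_pyIdx_facts l.length e heR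
          refine ⟨by rw [hlen]; omega, by rw [hlen]; omega, (k : Int), ?_, ?_⟩
          · rw [PySem.List.mem_pyRange_one, hlen]
            constructor <;> omega
          · have hset : PySem.List.pySetD (PySem.List.pySetD l i ve) e vi
                = (PySem.List.pySetD l i ve).set k vi :=
              pv_pySetD_eq_set _ e vi k (by rw [PySem.List.length_pySetD]; exact hk)
            rw [hset, PySem.List.pyGet?_natCast]
            rw [List.getElem?_set_self (by rw [PySem.List.length_pySetD]; exact hkn)]
            simp [hclear]

-- ===== VERDICT (by name: the statement is the Claim_ definition above) =====
theorem setAndReturnIndex_spec : Claim_equal_setAndReturnIndex := by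
  intro l bit start end_ _ hpre
  unfold Spec_setAndReturnIndex setAndReturnIndex setAndReturnIndex_alt
  exact pv_main bit (end_ - start).toNat ((end_ - start).toNat + 1) ((end_ - start).toNat + 1)
    l start end_ le_rfl (by omega) (by omega) hpre
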